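-- pv_equiv track=rewrite | github.com/MarkVerbeek91/NumbersGameSolverFunc | NumbersGame/NumbersGame.py | find_matches_in_list
-- ===== SOURCE A (Python) =====
-- def find_matches_in_list(number_list):
--     matches = []
--     for i, num1 in enumerate(number_list):
--         if num1 == 0:
--             continue
--         for j, num2 in enumerate(number_list[i + 1:]):
--             if num2 == 0:
--                 continue
--             if is_match(num1, num2):
--                 matches.append((i, i+j+1))
--             else:
--                 break
--
--     return matches
--
-- def is_match(num1, num2):
--     return num1 == num2 or num1 + num2 == 10
-- ===== SOURCE B (Python) =====
-- def find_matches_in_list(number_list):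
--     # Group nonzero entries into maximal chains of consecutive matching values.
--     # Matching (v == w or v + w == 10) keeps the pair-set {v, 10 - v} invariant,
--     # so every in-order pair inside a chain is a match and chains never overlap:
--     # the answer is exactly all in-order index pairs within each chain.
--     chains = []
--     cur = []
--     last = None
--     for i, v in enumerate(number_list):
--         if v == 0:
--             continue
--         if cur and (v == last or v + last == 10):
--             cur.append(i)
--         else:
--             if cur:
--                 chains.append(cur)
--             cur = [i]
--         last = v
--     if cur:
--         chains.append(cur)
--     return [(a, b) for chain in chains for k, a in enumerate(chain) for b in chain[k + 1:]]
-- ===== Notes on version B (the rewrite author's own statement) =====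
-- stated objective: faster
-- what changed: B replaces A's nested scan-with-break by a single grouping pass that partitions nonzero entries into maximal chains of consecutively matching values (valid because matching preserves the pair-set {v,10-v}), then emits all in-order index pairs within each chain.
import Mathlib
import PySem

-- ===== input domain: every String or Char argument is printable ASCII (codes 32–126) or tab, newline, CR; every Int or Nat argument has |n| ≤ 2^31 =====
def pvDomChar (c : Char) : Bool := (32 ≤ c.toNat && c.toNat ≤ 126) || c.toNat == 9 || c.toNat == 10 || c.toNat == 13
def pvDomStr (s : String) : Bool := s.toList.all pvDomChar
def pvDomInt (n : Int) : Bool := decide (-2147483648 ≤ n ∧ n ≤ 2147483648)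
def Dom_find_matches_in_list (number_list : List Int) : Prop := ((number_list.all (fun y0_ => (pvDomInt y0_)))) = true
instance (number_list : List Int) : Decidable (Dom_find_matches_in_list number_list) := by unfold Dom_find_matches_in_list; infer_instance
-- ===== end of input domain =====

-- B groups nonzero entries into maximal chains of consecutively matching values and emits
-- all in-order pairs per chain, instead of A's nested forward scan with break (same values proved equal).

-- ===== PORT A =====
-- inner loop: for j, num2 in enumerate(number_list[i+1:]): skip zeros, append on match, break otherwise
def pvInnerA (num1 i : Int) : List Int → Int → List (Int × Int) → List (Int × Int)
  | [], _, ms => ms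
  | num2 :: rest, j, ms =>
    if num2 = 0 then pvInnerA num1 i rest (j + 1) ms
    else if num1 = num2 ∨ num1 + num2 = 10 then
      pvInnerA num1 i rest (j + 1) (ms ++ [(i, i + j + 1)])
    else ms

-- outer loop: for i, num1 in enumerate(number_list); the current suffix's tail is number_list[i+1:]
def pvOuterA : List Int → Int → List (Int × Int) → List (Int × Int)
  | [], _, ms => ms
  | num1 :: rest, i, ms =>
    if num1 = 0 then pvOuterA rest (i + 1) ms
    else pvOuterA rest (i + 1) (pvInnerA num1 i rest 0 ms)

def find_matches_in_list (number_list : List Int) : List (Int × Int) :=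
  pvOuterA number_list 0 []

-- ===== PORT B =====
-- the grouping loop after the first nonzero element: 'last' is the previous nonzero value,
-- 'cur' the chain being built (cur.append(i) ↔ cur ++ [i]); zeros are skipped
def pvChainsAux (last : Int) (cur : List Int) : List (Int × Int) → List (List Int)
  | [] => [cur]
  | (i, v) :: rest =>
    if v = last ∨ v + last = 10 then pvChainsAux v (cur ++ [i]) rest
    else cur :: pvChainsAux v [i] rest

-- the grouping loop from the start (cur empty until the first nonzero element)
def pvChains : List (Int × Int) → List (List Int)
  | [] => []
  | (i, v) :: rest => pvChainsAux v [i] rest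

-- nonzero (index, value) pairs, via enumerate skipping zeros
def pvNzFrom : List Int → Int → List (Int × Int)
  | [], _ => []
  | v :: rest, i => if v = 0 then pvNzFrom rest (i + 1) else (i, v) :: pvNzFrom rest (i + 1)

-- [(a, b) for k, a in enumerate(chain) for b in chain[k+1:]]
def pvPairs : List Int → List (Int × Int)
  | [] => []
  | a :: rest => rest.map (fun b => (a, b)) ++ pvPairs rest

def find_matches_in_list_alt (number_list : List Int) : List (Int × Int) :=
  ((pvChains (pvNzFrom number_list 0)).map pvPairs).flatten

-- ===== PRECONDITION & SPEC =====
def Spec_find_matches_in_list (number_list : List Int) (out : List (Int × Int)) : Prop := out = find_matches_in_list_alt number_list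
instance (number_list : List Int) (out : List (Int × Int)) : Decidable (Spec_find_matches_in_list number_list out) := by unfold Spec_find_matches_in_list; infer_instance

-- ===== CLAIM (what is proved, stated in full; the proofs are below) =====
def Claim_equal_find_matches_in_list : Prop := ∀ (number_list : List Int), Dom_find_matches_in_list number_list → Spec_find_matches_in_list number_list (find_matches_in_list number_list)

-- ===== LEMMAS AND PROOFS =====

-- proof-side: A's behaviour on the compact nonzero list
def pvWalkB (v i : Int) : List (Int × Int) → List (Int × Int)
  | [] => []
  | (j, w) :: rest => if v = w ∨ v + w = 10 then (i, j) :: pvWalkB v i rest else []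

def pvOuterB : List (Int × Int) → List (Int × Int)
  | [] => []
  | (i, v) :: rest => pvWalkB v i rest ++ pvOuterB rest

-- proof-side: split off the first maximal chain after a value v
def pvChainSplit (v : Int) : List (Int × Int) → List Int × List (Int × Int)
  | [] => ([], [])
  | (j, w) :: rest =>
    if w = v ∨ w + v = 10 then ((j :: (pvChainSplit w rest).1, (pvChainSplit w rest).2)) else ([], (j, w) :: rest)

theorem pvInnerA_eq (num1 i : Int) :
    ∀ (rest : List Int) (j : Int) (acc : List (Int × Int)),
      pvInnerA num1 i rest j acc = acc ++ pvWalkB num1 i (pvNzFrom rest (i + j + 1)) := by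
  intro rest
  induction rest with
  | nil => intro j acc; simp [pvInnerA, pvNzFrom, pvWalkB]
  | cons num2 rest ih =>
    intro j acc
    by_cases h0 : num2 = 0
    · simp only [pvInnerA, pvNzFrom]
      rw [if_pos h0, if_pos h0, ih]
      ring_nf
    · simp only [pvInnerA, pvNzFrom, if_neg h0]
      by_cases hm : num1 = num2 ∨ num1 + num2 = 10
      · rw [if_pos hm, ih, pvWalkB, if_pos hm]
        simp; ring_nf
      · rw [if_neg hm, pvWalkB, if_neg hm]; simp

theorem pvOuterA_eq :
    ∀ (l : List Int) (i : Int) (acc : List (Int × Int)),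
      pvOuterA l i acc = acc ++ pvOuterB (pvNzFrom l i) := by
  intro l
  induction l with
  | nil => intro i acc; simp [pvOuterA, pvNzFrom, pvOuterB]
  | cons num1 rest ih =>
    intro i acc
    by_cases h0 : num1 = 0
    · simp [pvOuterA, pvNzFrom, h0, ih]
    · simp only [pvOuterA, pvNzFrom, if_neg h0, ih, pvOuterB]
      rw [pvInnerA_eq]
      simp

-- matching preserves the pair-set {v, 10 - v}: a chain split after w equals one split after v
theorem pvChainSplit_inv (v w : Int) (h : w = v ∨ w + v = 10) :
    ∀ l, pvChainSplit w l = pvChainSplit v l := by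
  intro l
  induction l with
  | nil => rfl
  | cons p rest ih =>
    obtain ⟨j, x⟩ := p
    have hc : (x = w ∨ x + w = 10) ↔ (x = v ∨ x + v = 10) := by
      rcases h with h | h <;> constructor <;> rintro (rfl | h2) <;> omega
    simp only [pvChainSplit]
    by_cases hx : x = v ∨ x + v = 10
    · rw [if_pos (hc.mpr hx), if_pos hx]
    · rw [if_neg (fun c => hx (hc.mp c)), if_neg hx]

theorem pvWalkB_eq (v i : Int) :
    ∀ l, pvWalkB v i l = (pvChainSplit v l).1.map (fun j => (i, j)) := by
  intro l
  induction l with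
  | nil => rfl
  | cons p rest ih =>
    obtain ⟨j, w⟩ := p
    have hc : (v = w ∨ v + w = 10) ↔ (w = v ∨ w + v = 10) := by
      constructor <;> rintro (h | h) <;> omega
    simp only [pvWalkB, pvChainSplit]
    by_cases hm : v = w ∨ v + w = 10
    · rw [if_pos hm, if_pos (hc.mp hm), ih, pvChainSplit_inv v w (hc.mp hm)]
      simp
    · rw [if_neg hm, if_neg (fun c => hm (hc.mpr c))]
      simp

theorem pvChainsAux_eq (l : List (Int × Int)) :
    ∀ (v : Int) (cur : List Int),
      pvChainsAux v cur l = (cur ++ (pvChainSplit v l).1) :: pvChains (pvChainSplit v l).2 := by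
  induction l with
  | nil => intro v cur; simp [pvChainsAux, pvChainSplit, pvChains]
  | cons p rest ih =>
    obtain ⟨j, w⟩ := p
    intro v cur
    simp only [pvChainsAux, pvChainSplit]
    by_cases hm : w = v ∨ w + v = 10
    · rw [if_pos hm, if_pos hm, ih]
      simp
    · rw [if_neg hm, if_neg hm]
      simp [pvChains]

-- main bridge on the compact list, by induction on a length bound
theorem pvOuterB_chains :
    ∀ (n : Nat) (nz : List (Int × Int)), nz.length ≤ n →
      pvOuterB nz = ((pvChains nz).map pvPairs).flatten := by
  intro n
  induction n with
  | zero =>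
    intro nz h
    have : nz = [] := List.eq_nil_of_length_eq_zero (Nat.le_zero.mp h)
    subst this; rfl
  | succ n ih =>
    intro nz h
    -- auxiliary: A's compact-list output equals first-chain pairs plus the rest
    have split : ∀ (rest : List (Int × Int)), rest.length ≤ n → ∀ (v : Int),
        pvOuterB rest =
          pvPairs (pvChainSplit v rest).1 ++ ((pvChains (pvChainSplit v rest).2).map pvPairs).flatten := by
      intro rest
      induction rest with
      | nil => intro _ v; rfl
      | cons p rest' ihs =>
        obtain ⟨j, w⟩ := p
        intro hlen v
        by_cases hm : w = v ∨ w + v = 10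
        · simp only [pvOuterB, pvChainSplit, if_pos hm]
          rw [pvWalkB_eq, ihs (by simpa using Nat.le_of_succ_le hlen) w]
          simp [pvPairs]
        · simp only [pvChainSplit, if_neg hm]
          rw [pvPairs]
          simpa using ih ((j, w) :: rest') hlen
    match nz, h with
    | [], _ => rfl
    | (i, v) :: rest, h =>
      have hlen : rest.length ≤ n := by simpa using Nat.le_of_succ_le_succ h
      rw [show pvOuterB ((i, v) :: rest) = pvWalkB v i rest ++ pvOuterB rest from rfl,
          show pvChains ((i, v) :: rest) = pvChainsAux v [i] rest from rfl,
          pvChainsAux_eq, pvWalkB_eq, split rest hlen v]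
      simp [pvPairs]

-- ===== VERDICT (by name: the statement is the Claim_ definition above) =====
theorem find_matches_in_list_spec : Claim_equal_find_matches_in_list := by
  intro number_list _
  unfold Spec_find_matches_in_list find_matches_in_list find_matches_in_list_alt
  rw [pvOuterA_eq, pvOuterB_chains (pvNzFrom number_list 0).length _ le_rfl]
  simp
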